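-- pv_equiv track=rewrite | github.com/pserey/aura | scripts/job_status.py | infer_container_family_from_cmd
-- ===== SOURCE A (Python) =====
-- def infer_container_family_from_cmd(name: str | None, path: str | None, args: list[str] | None, known_families: set[str]) -> str | None:
--     hay = []
--     if name: hay.append(name)
--     if path: hay.append(path)
--     if args: hay.extend(args)
--     text = " ".join(hay)
--     for fam in sorted(known_families, key=len, reverse=True):
--         if fam in text:
--             return fam
--     return None
-- ===== SOURCE B (Python) =====
-- def infer_container_family_from_cmd(name, path, args, known_families):
--     text = " ".join([s for s in (name, path) if s] + list(args or []))
--     matches = [f for f in known_families if f in text]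
--     return max(matches, key=len, default=None)
-- ===== Notes on version B (the rewrite author's own statement) =====
-- stated objective: simpler
-- what changed: B drops A's length-descending sort and early-return scan: it builds the text in one expression, filters the families present in the text in one pass, and returns the longest match with max(key=len, default=None); ties resolve to the same element because Python's stable descending sort and max both keep the first maximal element in iteration order.
-- outside the precondition, e.g. on infer_container_family_from_cmd('ab', 'cd', None, {'ab', 'cd'}): A returns 'ab', B returns 'ab'
import Mathlib
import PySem

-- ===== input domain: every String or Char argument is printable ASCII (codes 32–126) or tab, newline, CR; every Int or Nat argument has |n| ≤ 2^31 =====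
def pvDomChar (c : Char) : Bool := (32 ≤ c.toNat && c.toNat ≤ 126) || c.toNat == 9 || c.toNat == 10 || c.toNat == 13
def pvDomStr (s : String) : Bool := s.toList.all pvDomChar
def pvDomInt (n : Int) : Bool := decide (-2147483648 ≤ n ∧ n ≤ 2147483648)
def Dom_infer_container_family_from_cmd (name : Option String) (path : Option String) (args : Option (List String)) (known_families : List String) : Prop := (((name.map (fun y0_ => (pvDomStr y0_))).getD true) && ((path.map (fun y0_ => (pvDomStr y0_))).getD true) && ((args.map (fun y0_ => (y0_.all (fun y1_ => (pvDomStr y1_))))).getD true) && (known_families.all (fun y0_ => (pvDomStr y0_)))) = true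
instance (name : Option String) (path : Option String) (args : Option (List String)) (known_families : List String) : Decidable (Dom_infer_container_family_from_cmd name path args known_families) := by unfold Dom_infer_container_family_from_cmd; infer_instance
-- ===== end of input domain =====

-- B replaces A's length-descending sort + early-return scan by a one-pass filter of the families
-- occurring in the text followed by max(key=len) (objective: simpler). known_families is a Python
-- set: Pre_ below excludes the inputs whose result depends on its iteration order.

-- ===== PORT A =====
-- A's for-loop with early return, as structural recursion.
def pvScanA (text : String) : List String → Option String
  | [] => none
  | f :: rest => if PySem.Str.isIn f text then some f else pvScanA text rest

def infer_container_family_from_cmd (name : Option String) (path : Option String) (args : Option (List String)) (known_families : List String) : Option String :=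
  let hay : List String := []
  let hay := match name with
    | some s => if s ≠ "" then hay ++ [s] else hay
    | none => hay
  let hay := match path with
    | some s => if s ≠ "" then hay ++ [s] else hay
    | none => hay
  let hay := match args with
    | some l => if l ≠ [] then hay ++ l else hay
    | none => hay
  let text := PySem.Str.join " " hay
  pvScanA text (PySem.List.sorted known_families PySem.Str.len true)

-- ===== PORT B =====
def infer_container_family_from_cmd_alt (name : Option String) (path : Option String) (args : Option (List String)) (known_families : List String) : Option String :=
  -- text = " ".join([s for s in (name, path) if s] + list(args or []))
  let text := PySem.Str.join " "
    (([name, path].filterMap (fun o => match o with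
        | some s => if s ≠ "" then some s else none
        | none => none)) ++ args.getD [])
  -- matches = [f for f in known_families if f in text]; return max(matches, key=len, default=None)
  PySem.List.max? (known_families.filter (fun f => PySem.Str.isIn f text)) PySem.Str.len

-- ===== PRECONDITION & SPEC =====
-- the joined command text, for stating Pre_ only (neither port uses this definition)
def pvText (name : Option String) (path : Option String) (args : Option (List String)) : String :=
  PySem.Str.join " "
    (([name, path].filterMap (fun o => match o with
        | some s => if s ≠ "" then some s else none
        | none => none)) ++ args.getD [])

-- known_families is an UNORDERED Python set: Pre_ excludes inputs where two distinct families of equal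
-- length both occur in the text, since there the chosen family can depend on the set's hash iteration order.
def Pre_infer_container_family_from_cmd (name : Option String) (path : Option String) (args : Option (List String)) (known_families : List String) : Prop :=
  ∀ f ∈ known_families, ∀ g ∈ known_families, f ≠ g →
    ¬(PySem.Str.len f = PySem.Str.len g ∧
      PySem.Str.isIn f (pvText name path args) = true ∧
      PySem.Str.isIn g (pvText name path args) = true)
instance (name : Option String) (path : Option String) (args : Option (List String)) (known_families : List String) : Decidable (Pre_infer_container_family_from_cmd name path args known_families) := by unfold Pre_infer_container_family_from_cmd; infer_instance

def pvWitness_infer_container_family_from_cmd : Option String × Option String × Option (List String) × List String :=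
  (some "nginx", none, some ["-g", "daemon off;"], ["nginx", "redis"])

def Spec_infer_container_family_from_cmd (name : Option String) (path : Option String) (args : Option (List String)) (known_families : List String) (out : Option String) : Prop := out = infer_container_family_from_cmd_alt name path args known_families
instance (name : Option String) (path : Option String) (args : Option (List String)) (known_families : List String) (out : Option String) : Decidable (Spec_infer_container_family_from_cmd name path args known_families out) := by unfold Spec_infer_container_family_from_cmd; infer_instance

-- ===== CLAIM (what is proved, stated in full; the proofs are below) =====
def Claim_equal_infer_container_family_from_cmd : Prop := ∀ (name : Option String) (path : Option String) (args : Option (List String)) (known_families : List String), Dom_infer_container_family_from_cmd name path args known_families → Pre_infer_container_family_from_cmd name path args known_families → Spec_infer_container_family_from_cmd name path args known_families (infer_container_family_from_cmd name path args known_families)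

-- ===== LEMMAS AND PROOFS =====

-- A's early-return scan is List.find?.
theorem pvScanA_eq_find? (text : String) (l : List String) :
    pvScanA text l = List.find? (fun f => PySem.Str.isIn f text) l := by
  induction l with
  | nil => rfl
  | cons f rest ih =>
    by_cases h : PySem.Str.isIn f text = true
    · simp only [pvScanA, if_pos h]
      exact (List.find?_cons_of_pos (p := fun g => PySem.Str.isIn g text) (l := rest) h).symm
    · simp only [pvScanA, if_neg h, ih]
      exact (List.find?_cons_of_neg (p := fun g => PySem.Str.isIn g text) (l := rest) (by simpa using h)).symm

-- the two text-building styles agree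
theorem pvHay_eq (name : Option String) (path : Option String) (args : Option (List String)) :
    (let hay : List String := []
     let hay := match name with
       | some s => if s ≠ "" then hay ++ [s] else hay
       | none => hay
     let hay := match path with
       | some s => if s ≠ "" then hay ++ [s] else hay
       | none => hay
     let hay := match args with
       | some l => if l ≠ [] then hay ++ l else hay
       | none => hay
     hay)
    = ([name, path].filterMap (fun o => match o with
        | some s => if s ≠ "" then some s else none
        | none => none)) ++ args.getD [] := by
  cases name <;> cases path <;> cases args <;>
    simp only [List.filterMap] <;> (try split_ifs) <;> (first | rfl | simp_all)

-- A's result characterised: the first match of the stable length-descending sort is a match of maximal length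
theorem pv_find_none (t : String) (fams : List String)
    (h : List.find? (fun f => PySem.Str.isIn f t) (PySem.List.sorted fams PySem.Str.len true) = none) :
    ∀ y ∈ fams, PySem.Str.isIn y t = false := by
  intro y hy
  have := List.find?_eq_none.mp h y ((PySem.List.mem_sorted _ _ _ _).mpr hy)
  simpa using this

theorem pv_find_some (t : String) (fams : List String) (m : String)
    (h : List.find? (fun f => PySem.Str.isIn f t) (PySem.List.sorted fams PySem.Str.len true) = some m) :
    m ∈ fams ∧ PySem.Str.isIn m t = true ∧
      ∀ y ∈ fams, PySem.Str.isIn y t = true → PySem.Str.len y ≤ PySem.Str.len m := by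
  obtain ⟨hpm, as, bs, hsplit, hprefix⟩ := List.find?_eq_some_iff_append.mp h
  have hms : m ∈ PySem.List.sorted fams PySem.Str.len true := by
    rw [hsplit]; exact List.mem_append.mpr (Or.inr List.mem_cons_self)
  refine ⟨(PySem.List.mem_sorted _ _ _ _).mp hms, hpm, ?_⟩
  have hpair := PySem.List.sorted_pairwise_rev fams PySem.Str.len
  rw [hsplit] at hpair
  intro y hy hpy
  have hys : y ∈ as ++ m :: bs := by
    rw [← hsplit]; exact (PySem.List.mem_sorted _ _ _ _).mpr hy
  rcases List.mem_append.mp hys with h1 | h2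
  · have hfalse := hprefix y h1
    rw [hpy] at hfalse
    exact absurd hfalse (by decide)
  · rcases List.mem_cons.mp h2 with rfl | h3
    · exact le_refl _
    · have hcons := (List.pairwise_append.mp hpair).2.1
      exact (List.pairwise_cons.mp hcons).1 y h3

-- B's result characterised: max?-of-the-filtered-list is a match of maximal length
theorem pv_max_none (t : String) (fams : List String)
    (h : PySem.List.max? (fams.filter (fun f => PySem.Str.isIn f t)) PySem.Str.len = none) :
    ∀ y ∈ fams, PySem.Str.isIn y t = false := by
  intro y hy
  have hnil := (PySem.List.max?_eq_none_iff _ _).mp h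
  by_contra hne
  have : y ∈ fams.filter (fun f => PySem.Str.isIn f t) :=
    List.mem_filter.mpr ⟨hy, by simpa using hne⟩
  rw [hnil] at this
  cases this

theorem pv_max_some (t : String) (fams : List String) (b : String)
    (h : PySem.List.max? (fams.filter (fun f => PySem.Str.isIn f t)) PySem.Str.len = some b) :
    b ∈ fams ∧ PySem.Str.isIn b t = true ∧
      ∀ y ∈ fams, PySem.Str.isIn y t = true → PySem.Str.len y ≤ PySem.Str.len b := by
  obtain ⟨hbl, hpb⟩ := List.mem_filter.mp (PySem.List.max?_mem h)
  refine ⟨hbl, by simpa using hpb, ?_⟩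
  intro y hy hpy
  exact PySem.List.max?_isMax h y (List.mem_filter.mpr ⟨hy, by simpa using hpy⟩)

-- core: under Pre_ (no two distinct equal-length matches) the two characterisations pin the same element
theorem pv_core (t : String) (fams : List String)
    (hpre : ∀ f ∈ fams, ∀ g ∈ fams, f ≠ g →
      ¬(PySem.Str.len f = PySem.Str.len g ∧ PySem.Str.isIn f t = true ∧ PySem.Str.isIn g t = true)) :
    List.find? (fun f => PySem.Str.isIn f t) (PySem.List.sorted fams PySem.Str.len true)
      = PySem.List.max? (fams.filter (fun f => PySem.Str.isIn f t)) PySem.Str.len := by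
  cases hA : List.find? (fun f => PySem.Str.isIn f t) (PySem.List.sorted fams PySem.Str.len true) with
  | none =>
    cases hB : PySem.List.max? (fams.filter (fun f => PySem.Str.isIn f t)) PySem.Str.len with
    | none => rfl
    | some b =>
      obtain ⟨hbl, hpb, _⟩ := pv_max_some t fams b hB
      have := pv_find_none t fams hA b hbl
      rw [hpb] at this
      exact absurd this (by decide)
  | some m =>
    obtain ⟨hml, hpm, hmmax⟩ := pv_find_some t fams m hA
    cases hB : PySem.List.max? (fams.filter (fun f => PySem.Str.isIn f t)) PySem.Str.len with
    | none =>
      have := pv_max_none t fams hB m hml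
      rw [hpm] at this
      exact absurd this (by decide)
    | some b =>
      obtain ⟨hbl, hpb, hbmax⟩ := pv_max_some t fams b hB
      by_cases heq : m = b
      · rw [heq]
      · have h1 : PySem.Str.len m ≤ PySem.Str.len b := hbmax m hml hpm
        have h2 : PySem.Str.len b ≤ PySem.Str.len m := hmmax b hbl hpb
        exact absurd ⟨le_antisymm h1 h2, hpm, hpb⟩ (hpre m hml b hbl heq)

-- ===== VERDICT (by name: the statement is the Claim_ definition above) =====
theorem infer_container_family_from_cmd_spec : Claim_equal_infer_container_family_from_cmd := by
  intro name path args known_families hdom hpre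
  show infer_container_family_from_cmd name path args known_families
      = infer_container_family_from_cmd_alt name path args known_families
  simp only [infer_container_family_from_cmd, infer_container_family_from_cmd_alt, pvHay_eq,
    pvScanA_eq_find?]
  exact pv_core (pvText name path args) known_families hpre
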